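-- pv_equiv track=rewrite | github.com/Scott-Larsen/LeetCode | 5772-CheckifWordEqualsSummationofTwoWords.py | isSumEqual
-- ===== SOURCE A (Python) =====
-- def isSumEqual(firstWord: str, secondWord: str, targetWord: str) -> bool:
--     def convert_to_int(word):
--         n = 0
--         for char in word:
--             n *= 10
--             n += ord(char) - 97
--         return n
--
--     return convert_to_int(firstWord) + convert_to_int(secondWord) == convert_to_int(
--         targetWord
--     )
-- ===== SOURCE B (Python) =====
-- def isSumEqual(firstWord: str, secondWord: str, targetWord: str) -> bool:
--     # Columnar check: scan all three words at once, right-aligned, accumulating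
--     # the scaled digit difference target - first - second; equality of the sums
--     # holds iff the accumulated difference is zero.
--     def digit(word, i):
--         # value of the i-th letter-digit from the right; 0 past the word's end
--         return ord(word[len(word) - 1 - i]) - 97 if i < len(word) else 0
--
--     diff = 0
--     mult = 1
--     for i in range(max(len(firstWord), len(secondWord), len(targetWord))):
--         diff += (digit(targetWord, i) - digit(firstWord, i) - digit(secondWord, i)) * mult
--         mult *= 10
--     return diff == 0
-- ===== Notes on version B (the rewrite author's own statement) =====
-- stated objective: alternative
-- what changed: Instead of converting each word separately to an integer and comparing a sum, B performs one right-aligned columnar scan over all three words simultaneously, accumulating the scaled per-position digit difference target-first-second and returning whether it is zero.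
import Mathlib
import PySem

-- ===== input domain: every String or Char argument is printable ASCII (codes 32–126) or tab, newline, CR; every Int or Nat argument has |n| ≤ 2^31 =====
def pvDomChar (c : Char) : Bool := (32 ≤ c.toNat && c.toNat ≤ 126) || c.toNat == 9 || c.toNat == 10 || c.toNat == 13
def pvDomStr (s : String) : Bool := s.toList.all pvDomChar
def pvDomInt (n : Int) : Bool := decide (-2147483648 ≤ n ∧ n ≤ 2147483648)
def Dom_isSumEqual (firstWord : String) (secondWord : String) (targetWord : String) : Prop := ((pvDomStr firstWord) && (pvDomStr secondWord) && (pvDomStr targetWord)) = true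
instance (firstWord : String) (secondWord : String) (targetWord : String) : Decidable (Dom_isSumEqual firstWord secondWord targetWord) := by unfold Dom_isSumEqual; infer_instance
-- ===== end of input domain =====

-- B replaces the three per-word integer conversions by one right-aligned columnar
-- scan of all three words accumulating the scaled digit difference; alternative
-- algorithm of the same cost.

-- ===== PORT A =====
-- Horner forward accumulation: n = n*10 + (ord c - 97)
def convA (word : String) : Int :=
  word.toList.foldl (fun n c => n * 10 + ((c.toNat : Int) - 97)) 0

def isSumEqual (firstWord : String) (secondWord : String) (targetWord : String) : Bool :=
  convA firstWord + convA secondWord == convA targetWord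

-- ===== PORT B =====
-- i-th letter-digit from the right, 0 past the word's end.
-- word[len-1-i] is in range when i < len, so List.getD is exact here.
def digitB (w : List Char) (i : Nat) : Int :=
  if i < w.length then ((w.getD (w.length - 1 - i) 'a').toNat : Int) - 97 else 0

def isSumEqual_alt (firstWord : String) (secondWord : String) (targetWord : String) : Bool :=
  let f := firstWord.toList
  let s := secondWord.toList
  let t := targetWord.toList
  let dm := (List.range (max (max f.length s.length) t.length)).foldl
    (fun (dm : Int × Int) i =>
      (dm.1 + (digitB t i - digitB f i - digitB s i) * dm.2, dm.2 * 10))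
    (0, 1)
  dm.1 == 0

-- ===== PRECONDITION & SPEC =====
def Spec_isSumEqual (firstWord : String) (secondWord : String) (targetWord : String) (out : Bool) : Prop := out = isSumEqual_alt firstWord secondWord targetWord
instance (firstWord : String) (secondWord : String) (targetWord : String) (out : Bool) : Decidable (Spec_isSumEqual firstWord secondWord targetWord out) := by unfold Spec_isSumEqual; infer_instance

-- ===== CLAIM (what is proved, stated in full; the proofs are below) =====
def Claim_equal_isSumEqual : Prop := ∀ (firstWord : String) (secondWord : String) (targetWord : String), Dom_isSumEqual firstWord secondWord targetWord → Spec_isSumEqual firstWord secondWord targetWord (isSumEqual firstWord secondWord targetWord)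

-- ===== LEMMAS AND PROOFS =====

-- positional value of the first n columns
def Ssum (w : List Char) (n : Nat) : Int := ∑ i ∈ Finset.range n, digitB w i * 10 ^ i

theorem loop_inv (f s t : List Char) (n : Nat) :
    (List.range n).foldl
      (fun (dm : Int × Int) i =>
        (dm.1 + (digitB t i - digitB f i - digitB s i) * dm.2, dm.2 * 10))
      (0, 1)
    = (Ssum t n - Ssum f n - Ssum s n, 10 ^ n) := by
  induction n with
  | zero => simp [Ssum]
  | succ n ih =>
    rw [List.range_succ, List.foldl_append, ih]
    simp only [List.foldl_cons, List.foldl_nil, Ssum, Finset.sum_range_succ, pow_succ]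
    simp only [Prod.mk.injEq]
    exact ⟨by ring, trivial⟩

theorem Ssum_stable (w : List Char) (n : Nat) (h : w.length ≤ n) :
    Ssum w n = Ssum w w.length := by
  induction n with
  | zero =>
    have h0 : w.length = 0 := Nat.le_zero.mp h
    rw [h0]
  | succ n ih =>
    rcases Nat.lt_or_ge w.length (n+1) with hlt | hge
    · have hn : w.length ≤ n := by omega
      rw [Ssum, Finset.sum_range_succ, ← Ssum, ih hn]
      have : digitB w n = 0 := by unfold digitB; rw [if_neg]; omega
      simp [this]
    · have : w.length = n + 1 := by omega
      rw [this]

theorem digitB_cons_lt (c : Char) (l : List Char) (i : Nat) (h : i < l.length) :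
    digitB (c :: l) i = digitB l i := by
  unfold digitB
  rw [if_pos (by simp; omega), if_pos h]
  have h1 : (c :: l).length - 1 - i = (l.length - 1 - i) + 1 := by simp; omega
  rw [h1, List.getD_cons_succ]

theorem digitB_cons_len (c : Char) (l : List Char) :
    digitB (c :: l) l.length = ((c.toNat : Int) - 97) := by
  unfold digitB
  rw [if_pos (by simp)]
  simp

theorem horner_shift (l : List Char) (a : Int) :
    l.foldl (fun n c => n * 10 + ((c.toNat : Int) - 97)) a
      = a * 10 ^ l.length + l.foldl (fun n c => n * 10 + ((c.toNat : Int) - 97)) 0 := by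
  induction l generalizing a with
  | nil => simp
  | cons c l ih =>
    simp only [List.foldl_cons, List.length_cons]
    rw [ih (a * 10 + _), ih (0 * 10 + _), pow_succ]
    ring

theorem convA_eq_Ssum (w : List Char) :
    w.foldl (fun n c => n * 10 + ((c.toNat : Int) - 97)) 0 = Ssum w w.length := by
  induction w with
  | nil => simp [Ssum]
  | cons c l ih =>
    simp only [List.foldl_cons, List.length_cons]
    rw [horner_shift, ih]
    unfold Ssum
    have hs : (∑ i ∈ Finset.range l.length, digitB (c :: l) i * 10 ^ i)
        = ∑ i ∈ Finset.range l.length, digitB l i * 10 ^ i :=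
      Finset.sum_congr rfl (fun i hi => by
        rw [digitB_cons_lt c l i (Finset.mem_range.mp hi)])
    rw [Finset.sum_range_succ, digitB_cons_len, hs]
    ring

-- ===== VERDICT (by name: the statement is the Claim_ definition above) =====
theorem isSumEqual_spec : Claim_equal_isSumEqual := by
  intro fw sw tw _
  unfold Spec_isSumEqual isSumEqual isSumEqual_alt convA
  simp only []
  set f := fw.toList
  set s := sw.toList
  set t := tw.toList
  set n := max (max f.length s.length) t.length with hn
  rw [loop_inv f s t n]
  simp only [convA_eq_Ssum]
  rw [← Ssum_stable f n (by omega), ← Ssum_stable s n (by omega), ← Ssum_stable t n (by omega)]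
  have : (Ssum f n + Ssum s n = Ssum t n) ↔ (Ssum t n - Ssum f n - Ssum s n = 0) := by omega
  simp [this]
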